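-- pv_equiv track=rewrite | github.com/bmm1709/SP24-CPSC-50300-002 | p-6.36.py | calculate_capital_gain
-- ===== SOURCE A (Python) =====
-- from collections import deque
--
-- def calculate_capital_gain(transactions):
--     """
--     In the code we calculates the total capital gain (or loss) for a sequence of transactions,
--     using the FIFO protocol to identify shares.
--
--     Args:
--     - transactions: list of tuples, each tuple represents a transaction
--                     Format: (transaction_type, number_of_shares, price_per_share)
--                     transaction_type: 'buy' or 'sell'
--                     number_of_shares: integer
--                     price_per_share: integer
--
--     Returns:
--     - capital_gain: integer
--     """
--     capital_gain = 0
--     shares_queue = deque()  # Queue to store purchased shares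
--
--     for transaction in transactions:
--         transaction_type, num_shares, price_per_share = transaction
--         if transaction_type == 'buy':
--             # Enqueue the purchased shares
--             shares_queue.append((num_shares, price_per_share))
--         elif transaction_type == 'sell':
--             # Dequeue shares from the queue and calculate capital gain
--             shares_sold = num_shares
--             while shares_sold > 0:
--                 if not shares_queue:
--                     # If no shares are available for sale, break the loop
--                     break
--                 # Dequeue shares from the queue
--                 shares_in_queue, purchase_price = shares_queue[0]
--                 if shares_in_queue <= shares_sold:
--                     # If all shares in the queue can be sold, calculate capital gain
--                     capital_gain += (shares_in_queue * (price_per_share - purchase_price))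
--                     shares_sold -= shares_in_queue
--                     shares_queue.popleft()
--                 else:
--                     # If only a portion of shares in the queue can be sold, update queue and break
--                     capital_gain += (shares_sold * (price_per_share - purchase_price))
--                     shares_queue[0] = (shares_in_queue - shares_sold, purchase_price)
--                     shares_sold = 0
--
--     return capital_gain
-- ===== SOURCE B (Python) =====
-- def calculate_capital_gain(transactions):
--     # Append-only buy ledger with a consumption pointer (index + shares used in
--     # the current lot), instead of a mutable deque of lots; each sell is booked
--     # as revenue-minus-cost rather than per-lot differences.
--     buys = []      # immutable (count, price) records, never popped or rewritten
--     i = 0          # index of the first lot not fully consumed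
--     used = 0       # shares already consumed from lot i
--     gain = 0
--     for transaction_type, num_shares, price_per_share in transactions:
--         if transaction_type == 'buy':
--             buys.append((num_shares, price_per_share))
--         elif transaction_type == 'sell':
--             remaining = num_shares
--             cost = 0
--             while remaining > 0 and i < len(buys):
--                 cnt, purchase_price = buys[i]
--                 avail = cnt - used
--                 if avail <= remaining:
--                     cost += avail * purchase_price
--                     remaining -= avail
--                     i += 1
--                     used = 0
--                 else:
--                     cost += remaining * purchase_price
--                     used += remaining
--                     remaining = 0
--             gain += (num_shares - remaining) * price_per_share - cost
--     return gain
-- ===== Notes on version B (the rewrite author's own statement) =====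
-- stated objective: alternative
-- what changed: Replaces the mutable deque of (count,price) lots (popleft / head-rewrite) by an append-only buy ledger with a consumption pointer (lot index plus shares used in the current lot), and books each sell as matched-shares*price minus matched cost instead of per-lot (sell-buy)*count differences.
import Mathlib
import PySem

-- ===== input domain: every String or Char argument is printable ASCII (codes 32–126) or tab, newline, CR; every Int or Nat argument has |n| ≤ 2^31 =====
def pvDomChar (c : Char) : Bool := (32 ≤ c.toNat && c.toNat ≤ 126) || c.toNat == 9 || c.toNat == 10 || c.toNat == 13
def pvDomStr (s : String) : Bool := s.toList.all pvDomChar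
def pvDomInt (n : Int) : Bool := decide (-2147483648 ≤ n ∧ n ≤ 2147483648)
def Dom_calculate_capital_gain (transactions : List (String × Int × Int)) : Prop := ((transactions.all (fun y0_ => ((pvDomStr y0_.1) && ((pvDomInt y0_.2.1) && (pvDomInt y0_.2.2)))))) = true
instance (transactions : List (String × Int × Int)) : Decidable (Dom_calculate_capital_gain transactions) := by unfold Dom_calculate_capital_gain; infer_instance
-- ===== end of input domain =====

-- B replaces A's mutable deque of (count, price) lots by an append-only buy ledger with a
-- consumption pointer and books each sell as revenue-minus-cost (objective: alternative).

-- ===== PORT A =====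
-- A's inner `while shares_sold > 0` loop: each iteration either pops the queue head or
-- zeroes shares_sold, so structural recursion on the queue is the loop verbatim.
def sellLoopA (price : Int) (sold gain : Int) (q : List (Int × Int)) : Int × List (Int × Int) :=
  if sold > 0 then
    match q with
    | [] => (gain, [])
    | (c, p) :: rest =>
      if c ≤ sold then sellLoopA price (sold - c) (gain + c * (price - p)) rest
      else (gain + sold * (price - p), (c - sold, p) :: rest)
  else (gain, q)

def stepA (s : Int × List (Int × Int)) (t : String × Int × Int) : Int × List (Int × Int) :=
  let (gain, q) := s
  let (tt, n, p) := t
  if tt == "buy" then (gain, q ++ [(n, p)])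
  else if tt == "sell" then sellLoopA p n gain q
  else s

def calculate_capital_gain (transactions : List (String × Int × Int)) : Int :=
  (transactions.foldl stepA (0, [])).1

-- ===== PORT B =====
-- Source B's `while remaining > 0 and i < len(buys)` loop; returns (remaining, cost, i, used).
def sellLoopB (buys : List (Int × Int)) (remaining cost : Int) (i : Nat) (used : Int) :
    Int × Int × Nat × Int :=
  if h : remaining > 0 ∧ i < buys.length then
    let (cnt, bp) := buys[i]'h.2
    let avail := cnt - used
    if avail ≤ remaining then sellLoopB buys (remaining - avail) (cost + avail * bp) (i + 1) 0
    else (0, cost + remaining * bp, i, used + remaining)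
  else (remaining, cost, i, used)
termination_by buys.length - i
decreasing_by omega

def stepB (s : Int × List (Int × Int) × Nat × Int) (t : String × Int × Int) :
    Int × List (Int × Int) × Nat × Int :=
  let (gain, buys, i, used) := s
  let (tt, n, price) := t
  if tt == "buy" then (gain, buys ++ [(n, price)], i, used)
  else if tt == "sell" then
    let out := sellLoopB buys n 0 i used
    (gain + (n - out.1) * price - out.2.1, buys, out.2.2.1, out.2.2.2)
  else s

def calculate_capital_gain_alt (transactions : List (String × Int × Int)) : Int :=
  (transactions.foldl stepB (0, [], 0, 0)).1

-- ===== PRECONDITION & SPEC =====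
def Spec_calculate_capital_gain (transactions : List (String × Int × Int)) (out : Int) : Prop := out = calculate_capital_gain_alt transactions
instance (transactions : List (String × Int × Int)) (out : Int) : Decidable (Spec_calculate_capital_gain transactions out) := by unfold Spec_calculate_capital_gain; infer_instance

-- ===== CLAIM (what is proved, stated in full; the proofs are below) =====
def Claim_equal_calculate_capital_gain : Prop := ∀ (transactions : List (String × Int × Int)), Dom_calculate_capital_gain transactions → Spec_calculate_capital_gain transactions (calculate_capital_gain transactions)

-- ===== LEMMAS AND PROOFS =====

-- A's queue, reconstructed from B's state: the suffix of the buy ledger from the pointer,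
-- with `used` shares removed from the head lot.
def headAdjust (u : Int) : List (Int × Int) → List (Int × Int)
  | [] => []
  | (c, p) :: r => (c - u, p) :: r

lemma headAdjust_zero (l : List (Int × Int)) : headAdjust 0 l = l := by
  cases l with
  | nil => rfl
  | cons x r => cases x; simp [headAdjust]

lemma headAdjust_append (u : Int) (l : List (Int × Int)) (x : Int × Int) (h : l ≠ []) :
    headAdjust u (l ++ [x]) = headAdjust u l ++ [x] := by
  cases l with
  | nil => exact absurd rfl h
  | cons y r => cases y; simp [headAdjust]

-- The two sell loops agree: A's loop on the reconstructed queue returns B's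
-- revenue-minus-cost gain and the queue reconstructed from B's new pointer state.
lemma sell_rel (buys : List (Int × Int)) (price : Int) :
    ∀ (k i : Nat), buys.length - i = k → i ≤ buys.length → ∀ (u : Int),
      (i = buys.length → u = 0) → ∀ (r g c : Int),
      sellLoopA price r g (headAdjust u (buys.drop i)) =
        ((g + (r - (sellLoopB buys r c i u).1) * price - ((sellLoopB buys r c i u).2.1 - c)),
          headAdjust (sellLoopB buys r c i u).2.2.2 (buys.drop (sellLoopB buys r c i u).2.2.1))
      ∧ (sellLoopB buys r c i u).2.2.1 ≤ buys.length
      ∧ ((sellLoopB buys r c i u).2.2.1 = buys.length → (sellLoopB buys r c i u).2.2.2 = 0) := by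
  intro k
  induction k with
  | zero =>
    intro i hk hi u hu r g c
    have hi' : i = buys.length := by omega
    have hu' : u = 0 := hu hi'
    have hdrop : buys.drop i = [] := by simp [hi']
    rw [sellLoopB]
    have hcond : ¬ (r > 0 ∧ i < buys.length) := by omega
    rw [dif_neg hcond]
    refine ⟨?_, hi, hu⟩
    rw [sellLoopA.eq_def]
    simp only [hdrop, hu', headAdjust_zero]
    split_ifs <;> exact Prod.ext (by ring) rfl
  | succ k ih =>
    intro i hk hi u hu r g c
    have hi' : i < buys.length := by omega
    by_cases hr : r > 0
    · rcases hx : buys[i]'hi' with ⟨cnt, bp⟩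
      have hdrop : buys.drop i = (cnt, bp) :: buys.drop (i + 1) := by
        rw [← List.getElem_cons_drop hi', hx]
      rw [sellLoopB, dif_pos ⟨hr, hi'⟩]
      simp only [List.get_eq_getElem, hx]
      by_cases hav : cnt - u ≤ r
      · rw [if_pos hav]
        have hrec := ih (i + 1) (by omega) (by omega) 0 (fun _ => rfl)
          (r - (cnt - u)) (g + (cnt - u) * (price - bp)) (c + (cnt - u) * bp)
        rw [sellLoopA.eq_def, if_pos hr, hdrop]
        simp only [headAdjust]
        rw [if_pos hav]
        refine ⟨?_, hrec.2.1, hrec.2.2⟩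
        rw [← headAdjust_zero (buys.drop (i + 1)), hrec.1]
        refine Prod.ext ?_ rfl
        ring
      · rw [if_neg hav]
        rw [sellLoopA.eq_def, if_pos hr, hdrop]
        simp only [headAdjust]
        rw [if_neg hav]
        refine ⟨?_, le_of_lt hi', fun h => absurd h (by omega)⟩
        refine Prod.ext (by ring) ?_
        have hcu : cnt - u - r = cnt - (u + r) := by ring
        rw [hcu]
    · rw [sellLoopB, dif_neg (by omega)]
      refine ⟨?_, hi, hu⟩
      rw [sellLoopA.eq_def, if_neg hr]
      refine Prod.ext (by ring) rfl

-- The folds agree under the state correspondence.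
lemma fold_rel : ∀ (ts : List (String × Int × Int)) (g : Int) (buys : List (Int × Int))
    (i : Nat) (u : Int), i ≤ buys.length → (i = buys.length → u = 0) →
    (ts.foldl stepA (g, headAdjust u (buys.drop i))).1 =
    (ts.foldl stepB (g, buys, i, u)).1 := by
  intro ts
  induction ts with
  | nil => intro g buys i u hi hu; rfl
  | cons t ts ih =>
    intro g buys i u hi hu
    obtain ⟨tt, n, p⟩ := t
    simp only [List.foldl_cons, stepA, stepB]
    by_cases hb : tt == "buy"
    · rw [if_pos hb, if_pos hb]
      have hq : headAdjust u ((buys ++ [(n, p)]).drop i) =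
          headAdjust u (buys.drop i) ++ [(n, p)] := by
        by_cases he : i = buys.length
        · have hu' : u = 0 := hu he
          simp [he, hu', headAdjust]
        · have hi' : i < buys.length := by omega
          rw [List.drop_append_of_le_length (by omega)]
          exact headAdjust_append u _ _ (by
            intro hnil
            have := congrArg List.length hnil
            simp at this
            omega)
      rw [← hq]
      exact ih g (buys ++ [(n, p)]) i u (by simp; omega)
        (fun h => by simp at h; exact hu (by omega))
    · rw [if_neg hb, if_neg hb]
      by_cases hs : tt == "sell"
      · rw [if_pos hs, if_pos hs]
        have hrel := sell_rel buys p (buys.length - i) i rfl hi u hu n g 0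
        rw [hrel.1]
        simp only [sub_zero]
        exact ih _ buys _ _ hrel.2.1 hrel.2.2
      · rw [if_neg hs, if_neg hs]
        exact ih g buys i u hi hu

-- ===== VERDICT (by name: the statement is the Claim_ definition above) =====
theorem calculate_capital_gain_spec : Claim_equal_calculate_capital_gain := by
  intro ts _
  unfold Spec_calculate_capital_gain calculate_capital_gain calculate_capital_gain_alt
  have h := fold_rel ts 0 [] 0 0 (by simp) (fun _ => rfl)
  simpa [headAdjust_zero] using h
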